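-- pv_equiv track=rewrite | github.com/vaghani04/CGCM_2_0 | src/app/services/repo_map_service.py | _extract_js_file_header_comment
-- ===== SOURCE A (Python) =====
-- from typing import Dict, List, Optional, Set, Tuple
--
-- def _extract_js_file_header_comment(content: str) -> Optional[str]:
--     """Extract file header comment."""
--     lines = content.split('\n')
--     comment_lines = []
--
--     for line in lines[:20]:  # Check first 20 lines
--         line = line.strip()
--         if line.startswith('/**') or line.startswith('*') or line.startswith('//'):
--             comment_lines.append(line)
--         elif line and not line.startswith('import') and not line.startswith('export'):
--             break
--
--     if comment_lines:
--         return '\n'.join(comment_lines)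
--
--     return None
-- ===== SOURCE B (Python) =====
-- from typing import Optional
--
-- def _extract_js_file_header_comment(content: str) -> Optional[str]:
--     """Extract file header comment (recursive, builds the result string directly)."""
--     def go(lines):
--         if not lines:
--             return None
--         line = lines[0].strip()
--         if line.startswith(('/**', '*', '//')):
--             rest = go(lines[1:])
--             return line if rest is None else line + '\n' + rest
--         if line and not line.startswith(('import', 'export')):
--             return None
--         return go(lines[1:])
--     return go(content.split('\n')[:20])
-- ===== Notes on version B (the rewrite author's own statement) =====
-- stated objective: alternative
-- what changed: Replaces A's imperative accumulate-list-then-join-with-break loop by a recursive helper over the line list that fuses filtering and joining: it returns an Optional string directly, concatenating each comment line onto the recursive result, with no intermediate list and no join.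
import Mathlib
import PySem

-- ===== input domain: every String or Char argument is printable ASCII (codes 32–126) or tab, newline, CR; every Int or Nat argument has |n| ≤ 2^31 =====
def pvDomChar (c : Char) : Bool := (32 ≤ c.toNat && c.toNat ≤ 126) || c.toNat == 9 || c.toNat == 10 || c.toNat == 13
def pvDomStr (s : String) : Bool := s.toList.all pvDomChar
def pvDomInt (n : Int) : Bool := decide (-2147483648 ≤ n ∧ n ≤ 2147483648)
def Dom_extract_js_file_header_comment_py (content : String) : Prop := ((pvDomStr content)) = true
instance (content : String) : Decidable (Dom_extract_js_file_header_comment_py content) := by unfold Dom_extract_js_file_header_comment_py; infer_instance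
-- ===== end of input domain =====

-- B replaces A's accumulate-list/break/join loop by a recursion that fuses filtering and joining,
-- building the Optional result string directly; alternative decomposition, same cost.

-- ===== PORT A =====
-- line.startswith('/**') or line.startswith('*') or line.startswith('//')
def pvIsComment (l : String) : Bool :=
  PySem.Str.startswith l "/**" || PySem.Str.startswith l "*" || PySem.Str.startswith l "//"

-- A's for-loop with break, carrying comment_lines as accumulator
def pvLoopA : List String → List String → List String
  | [], acc => acc
  | l :: rest, acc =>
    let line := PySem.Str.strip l
    if pvIsComment line then pvLoopA rest (acc ++ [line])
    else if line ≠ "" && !PySem.Str.startswith line "import" && !PySem.Str.startswith line "export" then acc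
    else pvLoopA rest acc

def extract_js_file_header_comment_py (content : String) : Option String :=
  let lines := (PySem.Str.split? content "\n").getD []
  let comment_lines := pvLoopA (PySem.List.slice lines none (some 20)) []
  if comment_lines ≠ [] then some (PySem.Str.join "\n" comment_lines) else none

-- ===== PORT B =====
-- B's inner recursive helper 'go': returns the joined comment block of the remaining lines directly
def pvGoB : List String → Option String
  | [] => none
  | l :: rest =>
    let line := PySem.Str.strip l
    if pvIsComment line then
      match pvGoB rest with
      | none => some line
      | some r => some (line ++ "\n" ++ r)
    else if line ≠ "" && !PySem.Str.startswith line "import" && !PySem.Str.startswith line "export" then none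
    else pvGoB rest

def extract_js_file_header_comment_py_alt (content : String) : Option String :=
  pvGoB (PySem.List.slice ((PySem.Str.split? content "\n").getD []) none (some 20))

-- ===== PRECONDITION & SPEC =====
def Spec_extract_js_file_header_comment_py (content : String) (out : Option String) : Prop := out = extract_js_file_header_comment_py_alt content
instance (content : String) (out : Option String) : Decidable (Spec_extract_js_file_header_comment_py content out) := by unfold Spec_extract_js_file_header_comment_py; infer_instance

-- ===== CLAIM (what is proved, stated in full; the proofs are below) =====
def Claim_equal_extract_js_file_header_comment_py : Prop := ∀ (content : String), Dom_extract_js_file_header_comment_py content → Spec_extract_js_file_header_comment_py content (extract_js_file_header_comment_py content)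

-- ===== LEMMAS AND PROOFS =====

-- lines A's loop keeps scanning past (proof-only characterisation)
def pvKeep (l : String) : Bool :=
  pvIsComment l || l == "" || PySem.Str.startswith l "import" || PySem.Str.startswith l "export"

-- the comment lines both programs collect, as a list
def pvF (ls : List String) : List String :=
  ((ls.map PySem.Str.strip).takeWhile pvKeep).filter pvIsComment

-- A's loop computes the filter of the takeWhile-prefix of the stripped lines
theorem pvLoopA_eq (ls acc : List String) :
    pvLoopA ls acc = acc ++ pvF ls := by
  induction ls generalizing acc with
  | nil => simp [pvLoopA, pvF]
  | cons l rest ih =>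
    simp only [pvLoopA, pvF, List.map_cons, List.takeWhile_cons]
    by_cases hc : pvIsComment (PySem.Str.strip l)
    · have hk : pvKeep (PySem.Str.strip l) = true := by simp [pvKeep, hc]
      rw [hk]
      simp [hc, ih, pvF]
    · have h1 : pvIsComment (PySem.Str.strip l) = false := by simpa using hc
      by_cases hk : pvKeep (PySem.Str.strip l)
      · rw [hk]
        have hd := hk
        simp [pvKeep, h1] at hd
        rcases hd with (h | h) | h <;> simp [h1, h, ih, pvF, show pvIsComment "" = false from by decide]
      · have hkf : pvKeep (PySem.Str.strip l) = false := by simpa using hk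
        rw [hkf]
        have hd := hkf
        simp [pvKeep, h1] at hd
        obtain ⟨⟨he, hi⟩, hx⟩ := hd
        simp [h1, he, hi, hx]

-- join over a nonempty cons peels off the head with a separator
theorem pvJoin_cons (a : String) (rest : List String) (h : rest ≠ []) :
    PySem.Str.join "\n" (a :: rest) = a ++ "\n" ++ PySem.Str.join "\n" rest := by
  obtain ⟨q, t, rfl⟩ := List.exists_cons_of_ne_nil h
  apply String.toList_inj.mp
  simp [PySem.Str.toList_join, PySem.Chars.join_cons_cons]

theorem pvJoin_singleton (a : String) : PySem.Str.join "\n" [a] = a := by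
  apply String.toList_inj.mp
  simp [PySem.Str.toList_join, PySem.Chars.join_singleton]

-- B's recursion computes the optional join of the same comment lines
theorem pvGoB_eq (ls : List String) :
    pvGoB ls = if pvF ls = [] then none else some (PySem.Str.join "\n" (pvF ls)) := by
  induction ls with
  | nil => simp [pvGoB, pvF]
  | cons l rest ih =>
    simp only [pvGoB, pvF, List.map_cons, List.takeWhile_cons]
    by_cases hc : pvIsComment (PySem.Str.strip l)
    · have hk : pvKeep (PySem.Str.strip l) = true := by simp [pvKeep, hc]
      rw [hk]
      
      by_cases hemp : pvF rest = []
      · rw [ih, if_pos hemp]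
        simp only [pvF] at hemp
        simp [hc, hemp, pvJoin_singleton]
      · rw [ih, if_neg hemp]
        simp only [pvF] at hemp
        simp [pvF, hc, pvJoin_cons _ _ hemp]
    · have h1 : pvIsComment (PySem.Str.strip l) = false := by simpa using hc
      by_cases hk : pvKeep (PySem.Str.strip l)
      · rw [hk]
        have hd := hk
        simp [pvKeep, h1] at hd
        rcases hd with (h | h) | h <;>
          simp [h1, h, ih, pvF, show pvIsComment "" = false from by decide]
      · have hkf : pvKeep (PySem.Str.strip l) = false := by simpa using hk
        rw [hkf]
        have hd := hkf
        simp [pvKeep, h1] at hd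
        obtain ⟨⟨he, hi⟩, hx⟩ := hd
        simp [h1, he, hi, hx]

-- ===== VERDICT (by name: the statement is the Claim_ definition above) =====
theorem extract_js_file_header_comment_py_spec : Claim_equal_extract_js_file_header_comment_py := by
  intro content _
  unfold Spec_extract_js_file_header_comment_py extract_js_file_header_comment_py
    extract_js_file_header_comment_py_alt
  simp only [pvLoopA_eq, List.nil_append, pvGoB_eq]
  by_cases h : pvF (PySem.List.slice ((PySem.Str.split? content "\n").getD []) none (some 20)) = [] <;>
    simp [h]
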